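-- pv_equiv track=rewrite | github.com/Margarida27/feup-fpro | PEs/PE02 model/formating_strings.py | exactly
-- ===== SOURCE A (Python) =====
-- def exactly(s):
--     tup = ()
--     for x in range(len(s)):
--         for y in range(x + 1, len(s)):
--             if s[x].isdigit() and s[y].isdigit() and int(s[x]) + int(s[y]) == 10:
--               question_mark = s[x + 1:y]
--               if question_mark.count('?') == 3:
--                   tup += (s[x] + s[y],)
--               else:
--                   tup += (s[x] + s[y],)
--                   return 'The sequence {0} is NOT OK with first violation with pair: {1}'.format(s, tup)
--     return 'The sequence {0} is OK with the pair: {1}'.format(s, tup)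
-- ===== SOURCE B (Python) =====
-- def exactly(s):
--     # Prefix sums of '?' counts replace the repeated slice-and-count; digit values precomputed.
--     n = len(s)
--     pref = [0]
--     q = 0
--     for c in s:
--         q += (c == '?')
--         pref.append(q)
--     digits = [int(c) if c.isdigit() else None for c in s]
--     pairs = []
--     for x in range(n):
--         dx = digits[x]
--         if dx is None:
--             continue
--         for y in range(x + 1, n):
--             dy = digits[y]
--             if dy is not None and dx + dy == 10:
--                 pairs.append(s[x] + s[y])
--                 if pref[y] - pref[x + 1] != 3:
--                     return 'The sequence {0} is NOT OK with first violation with pair: {1}'.format(s, tuple(pairs))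
--     return 'The sequence {0} is OK with the pair: {1}'.format(s, tuple(pairs))
-- ===== Notes on version B (the rewrite author's own statement) =====
-- stated objective: faster
-- what changed: A re-slices the string and counts question marks for every digit pair (linear work per pair); B precomputes a prefix-sum table of question-mark counts and a digit-value table once, so each pair check is constant time.
import Mathlib
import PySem

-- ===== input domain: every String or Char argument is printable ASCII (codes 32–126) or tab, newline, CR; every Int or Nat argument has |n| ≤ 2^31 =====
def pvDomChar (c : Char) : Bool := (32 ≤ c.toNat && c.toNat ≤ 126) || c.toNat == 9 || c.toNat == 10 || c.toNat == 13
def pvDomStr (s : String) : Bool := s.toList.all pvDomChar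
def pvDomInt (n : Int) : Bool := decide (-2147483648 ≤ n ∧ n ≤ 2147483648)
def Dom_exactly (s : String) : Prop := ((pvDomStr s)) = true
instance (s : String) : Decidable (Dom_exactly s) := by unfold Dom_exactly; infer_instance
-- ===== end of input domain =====

-- B replaces A's per-pair slice-and-count of '?' by a prefix-sum table and precomputed
-- digit values (objective: faster — O(n^2) worst case instead of A's O(n^3)).
-- Both ports share only the output-formatting helpers and digitVal (the identical
-- expressions 'int(c)' and the two format strings of the Python sources).

-- '...{1}'.format(..., tup): str() of a Python tuple of strings (elements here are digit
-- pairs, so repr adds plain single quotes; exact for quote-free, backslash-free elements).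
-- Built on List Char (String.append is opaque to the kernel).
def pyStrRepr (x : String) : List Char := '\'' :: (x.toList ++ ['\''])

def tupleRepr (l : List String) : List Char :=
  match l with
  | [] => ['(', ')']
  | [x] => '(' :: (pyStrRepr x ++ [',', ')'])
  | _ => '(' :: (PySem.Chars.join [',', ' '] (l.map pyStrRepr) ++ [')'])

def fmtNotOK (s : String) (tup : List String) : String :=
  String.ofList ("The sequence ".toList ++ s.toList
    ++ " is NOT OK with first violation with pair: ".toList ++ tupleRepr tup)

def fmtOK (s : String) (tup : List String) : String :=
  String.ofList ("The sequence ".toList ++ s.toList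
    ++ " is OK with the pair: ".toList ++ tupleRepr tup)

-- int(c) for a single character c (both Pythons evaluate it only under an isdigit() guard)
def digitVal (c : Char) : Int := (PySem.Int.ofChars? [c]).getD 0

-- ===== PORT A =====
-- inner 'for y in range(x+1, len(s))' loop; .inl = loop finished, .inr = early return
def exactlyInner (s : String) (cs : List Char) (x : Int) :
    List Int → List String → (List String) ⊕ String
  | [], tup => .inl tup
  | y :: ys, tup =>
    let cx := PySem.List.pyGetD cs x ' '
    let cy := PySem.List.pyGetD cs y ' '
    if PySem.Chars.isdigit cx && PySem.Chars.isdigit cy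
        && (digitVal cx + digitVal cy == 10) then
      let qm := PySem.List.slice cs (some (x + 1)) (some y)   -- s[x+1:y]
      if PySem.Chars.count qm ['?'] == 3 then                 -- question_mark.count('?')
        exactlyInner s cs x ys (tup ++ [String.ofList [cx, cy]])
      else
        .inr (fmtNotOK s (tup ++ [String.ofList [cx, cy]]))
    else
      exactlyInner s cs x ys tup

-- outer 'for x in range(len(s))' loop
def exactlyOuter (s : String) (cs : List Char) :
    List Int → List String → String
  | [], tup => fmtOK s tup
  | x :: xs, tup =>
    match exactlyInner s cs x (PySem.List.pyRange (x + 1) (cs.length : Int) 1) tup with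
    | .inl tup' => exactlyOuter s cs xs tup'
    | .inr r => r

def exactly (s : String) : String :=
  exactlyOuter s s.toList (PySem.List.pyRange 0 (s.toList.length : Int) 1) []

-- ===== PORT B =====
-- pref: running count of '?' (pref[i] = number of '?' among the first i characters)
def exactlyAltPref (cs : List Char) : List Int :=
  (cs.foldl (fun (st : List Int × Int) c =>
      let q := st.2 + (if c == '?' then 1 else 0)
      (st.1 ++ [q], q)) ([0], 0)).1

-- digits: int(c) if c.isdigit() else None, for each character
def exactlyAltDigits (cs : List Char) : List (Option Int) :=
  cs.map (fun c => if PySem.Chars.isdigit c then some (digitVal c) else none)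

def exactlyAltInner (s : String) (cs : List Char) (digits : List (Option Int))
    (pref : List Int) (x dx : Int) :
    List Int → List String → (List String) ⊕ String
  | [], pairs => .inl pairs
  | y :: ys, pairs =>
    match PySem.List.pyGetD digits y none with
    | some dy =>
      if dx + dy == 10 then
        let pairs' := pairs ++ [String.ofList [PySem.List.pyGetD cs x ' ', PySem.List.pyGetD cs y ' ']]
        if PySem.List.pyGetD pref y 0 - PySem.List.pyGetD pref (x + 1) 0 != 3 then
          .inr (fmtNotOK s pairs')
        else
          exactlyAltInner s cs digits pref x dx ys pairs'
      else
        exactlyAltInner s cs digits pref x dx ys pairs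
    | none => exactlyAltInner s cs digits pref x dx ys pairs

def exactlyAltOuter (s : String) (cs : List Char) (digits : List (Option Int))
    (pref : List Int) :
    List Int → List String → String
  | [], pairs => fmtOK s pairs
  | x :: xs, pairs =>
    match PySem.List.pyGetD digits x none with
    | none => exactlyAltOuter s cs digits pref xs pairs       -- continue
    | some dx =>
      match exactlyAltInner s cs digits pref x dx
          (PySem.List.pyRange (x + 1) (cs.length : Int) 1) pairs with
      | .inl pairs' => exactlyAltOuter s cs digits pref xs pairs'
      | .inr r => r

def exactly_alt (s : String) : String :=
  let cs := s.toList
  exactlyAltOuter s cs (exactlyAltDigits cs) (exactlyAltPref cs)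
    (PySem.List.pyRange 0 (cs.length : Int) 1) []

-- ===== PRECONDITION & SPEC =====
def Spec_exactly (s : String) (out : String) : Prop := out = exactly_alt s
instance (s : String) (out : String) : Decidable (Spec_exactly s out) := by unfold Spec_exactly; infer_instance

-- ===== CLAIM (what is proved, stated in full; the proofs are below) =====
def Claim_equal_exactly : Prop := ∀ (s : String), Dom_exactly s → Spec_exactly s (exactly s)

-- ===== LEMMAS AND PROOFS =====

-- str.count with a single-character needle counts characters
lemma count_go_single (v : Char) :
    ∀ (fuel : Nat) (cs : List Char) (acc : Nat), cs.length ≤ fuel →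
      PySem.Chars.count.go [v] fuel cs acc = acc + cs.count v := by
  intro fuel
  induction fuel with
  | zero =>
    intro cs acc h
    have : cs = [] := List.eq_nil_of_length_eq_zero (Nat.le_zero.mp h)
    subst this; simp [PySem.Chars.count.go]
  | succ f ih =>
    intro cs acc h
    cases cs with
    | nil => simp [PySem.Chars.count.go]
    | cons c t =>
      simp only [PySem.Chars.count.go]
      by_cases hv : c = v
      · subst hv
        have hpre : [c].isPrefixOf (c :: t) = true := by simp [List.isPrefixOf]
        simp only [hpre, if_pos]
        rw [ih _ _ (by simpa using Nat.succ_le_succ_iff.mp h)]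
        simp
        omega
      · have hpre : [v].isPrefixOf (c :: t) = false := by
          simp [List.isPrefixOf]
          exact fun hc => absurd hc.symm hv
        simp only [hpre]
        rw [if_neg (by simp)]
        rw [ih _ _ (by simpa using Nat.succ_le_succ_iff.mp h)]
        simp [hv]

lemma count_single (cs : List Char) (v : Char) :
    PySem.Chars.count cs [v] = cs.count v := by
  simp only [PySem.Chars.count, List.isEmpty]
  rw [count_go_single v cs.length cs 0 le_rfl]
  simp

-- the prefix table is the list of '?'-counts of all prefixes
lemma pref_eq (cs : List Char) :
    exactlyAltPref cs
      = (List.range (cs.length + 1)).map (fun i => ((cs.take i).count '?' : Int)) := by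
  suffices h : ∀ (cs : List Char) (acc : List Int) (q : Int),
      (cs.foldl (fun (st : List Int × Int) c =>
          let q := st.2 + (if c == '?' then 1 else 0)
          (st.1 ++ [q], q)) (acc, q)).1
        = acc ++ (List.range cs.length).map
            (fun i => q + ((cs.take (i + 1)).count '?' : Int)) by
    have := h cs [0] 0
    unfold exactlyAltPref
    rw [this]
    rw [List.range_succ_eq_map]
    simp [List.map_map, Function.comp]
  intro cs
  induction cs with
  | nil => intro acc q; simp
  | cons c t ih =>
    intro acc q
    simp only [List.foldl_cons]
    rw [ih]
    simp only [List.length_cons]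
    rw [List.range_succ_eq_map, List.map_cons, List.map_map]
    rw [List.append_assoc, List.singleton_append]
    congr 1
    congr 1
    · by_cases hc : c = '?' <;> simp [hc]
    · refine List.map_congr_left (fun a _ => ?_)
      simp only [Function.comp, List.take_succ_cons, List.count_cons]
      push_cast
      by_cases hc : c = '?' <;> simp [hc] <;> ring

lemma pref_getD (cs : List Char) (i : Nat) (h : i ≤ cs.length) :
    PySem.List.pyGetD (exactlyAltPref cs) (i : Int) 0 = ((cs.take i).count '?' : Int) := by
  rw [PySem.List.pyGetD_natCast, pref_eq]
  rw [List.getD_eq_getElem?_getD]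
  rw [List.getElem?_map, List.getElem?_range (by omega)]
  simp

-- digits[i] for an in-range index
lemma digits_getD (cs : List Char) (i : Int) (h0 : 0 ≤ i) (h1 : i < (cs.length : Int)) :
    PySem.List.pyGetD (exactlyAltDigits cs) i none
      = (if PySem.Chars.isdigit (PySem.List.pyGetD cs i ' ') then
          some (digitVal (PySem.List.pyGetD cs i ' ')) else none) := by
  obtain ⟨j, rfl⟩ : ∃ j : Nat, i = (j : Int) := ⟨i.toNat, (Int.toNat_of_nonneg h0).symm⟩
  have hj : j < cs.length := by exact_mod_cast h1
  rw [PySem.List.pyGetD_natCast, PySem.List.pyGetD_natCast]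
  simp [exactlyAltDigits, List.getD_eq_getElem?_getD, hj]

-- s[x+1:y].count('?') as a difference of prefix counts
lemma slice_count (cs : List Char) (x y : Int) (hx : 0 ≤ x) (hxy : x + 1 ≤ y)
    (_hy : y ≤ (cs.length : Int)) :
    ((PySem.List.slice cs (some (x + 1)) (some y)).count '?' : Int)
      = ((cs.take y.toNat).count '?' : Int) - ((cs.take (x + 1).toNat).count '?' : Int) := by
  rw [PySem.List.slice_toNat cs (by omega) (by omega)]
  have hsplit : cs.take y.toNat
      = cs.take (x + 1).toNat ++ (cs.drop (x + 1).toNat).take (y.toNat - (x + 1).toNat) := by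
    conv_lhs => rw [show y.toNat = (x + 1).toNat + (y.toNat - (x + 1).toNat) from by omega]
    exact List.take_add
  rw [hsplit, List.count_append]
  push_cast
  ring

-- A's inner loop does nothing when s[x] is not a digit
lemma inner_nondigit (s : String) (cs : List Char) (x : Int)
    (hcx : PySem.Chars.isdigit (PySem.List.pyGetD cs x ' ') = false) :
    ∀ (ys : List Int) (tup : List String), exactlyInner s cs x ys tup = .inl tup := by
  intro ys
  induction ys with
  | nil => intro tup; rfl
  | cons y ys ih =>
    intro tup
    simp only [exactlyInner]
    simp [hcx]
    exact ih tup

-- inner loops agree when s[x] is a digit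
lemma inner_eq (s : String) (cs : List Char) (x : Int) (hx : 0 ≤ x)
    (hcx : PySem.Chars.isdigit (PySem.List.pyGetD cs x ' ') = true) :
    ∀ (ys : List Int) (tup : List String), (∀ y ∈ ys, x + 1 ≤ y ∧ y < (cs.length : Int)) →
      exactlyAltInner s cs (exactlyAltDigits cs) (exactlyAltPref cs) x
          (digitVal (PySem.List.pyGetD cs x ' ')) ys tup
        = exactlyInner s cs x ys tup := by
  intro ys
  induction ys with
  | nil => intro tup _; rfl
  | cons y ys ih =>
    intro tup hmem
    obtain ⟨hy1, hy2⟩ := hmem y (by simp)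
    have hrest : ∀ z ∈ ys, x + 1 ≤ z ∧ z < (cs.length : Int) :=
      fun z hz => hmem z (List.mem_cons_of_mem _ hz)
    have hy0 : 0 ≤ y := by omega
    simp only [exactlyInner, exactlyAltInner]
    rw [digits_getD cs y hy0 hy2]
    by_cases hdy : PySem.Chars.isdigit (PySem.List.pyGetD cs y ' ') = true
    · by_cases hsum : digitVal (PySem.List.pyGetD cs x ' ')
          + digitVal (PySem.List.pyGetD cs y ' ') = 10
      · have hdiff : PySem.List.pyGetD (exactlyAltPref cs) y 0
            - PySem.List.pyGetD (exactlyAltPref cs) (x + 1) 0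
            = ((PySem.Chars.count (PySem.List.slice cs (some (x + 1)) (some y)) ['?'] : Int)) := by
          have h1 := pref_getD cs y.toNat (by omega)
          rw [Int.toNat_of_nonneg hy0] at h1
          have h2 := pref_getD cs (x + 1).toNat (by omega)
          rw [Int.toNat_of_nonneg (by omega)] at h2
          rw [h1, h2, count_single, slice_count cs x y hx hy1 (by omega)]
        have ecast : (PySem.List.pyGetD (exactlyAltPref cs) y 0
              - PySem.List.pyGetD (exactlyAltPref cs) (x + 1) 0 = 3)
            ↔ PySem.Chars.count (PySem.List.slice cs (some (x + 1)) (some y)) ['?'] = 3 := by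
          rw [hdiff]; exact_mod_cast Iff.rfl
        by_cases h3 : PySem.Chars.count (PySem.List.slice cs (some (x + 1)) (some y)) ['?'] = 3
        · simp only [hdy, hcx, hsum]
          simp [ecast, h3, hsum]
          exact ih _ hrest
        · simp only [hdy, hcx, hsum]
          simp [ecast, h3, hsum]
      · simp [hdy, hsum]
        exact ih _ hrest
    · have hdy' : PySem.Chars.isdigit (PySem.List.pyGetD cs y ' ') = false := by simpa using hdy
      simp [hdy']
      exact ih _ hrest

-- outer loops agree
lemma outer_eq (s : String) (cs : List Char) :
    ∀ (xs : List Int) (tup : List String), (∀ x ∈ xs, 0 ≤ x ∧ x < (cs.length : Int)) →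
      exactlyAltOuter s cs (exactlyAltDigits cs) (exactlyAltPref cs) xs tup
        = exactlyOuter s cs xs tup := by
  intro xs
  induction xs with
  | nil => intro tup _; rfl
  | cons x xs ih =>
    intro tup hmem
    obtain ⟨hx0, hx1⟩ := hmem x (by simp)
    have hrest : ∀ z ∈ xs, 0 ≤ z ∧ z < (cs.length : Int) :=
      fun z hz => hmem z (List.mem_cons_of_mem _ hz)
    simp only [exactlyOuter, exactlyAltOuter]
    rw [digits_getD cs x hx0 hx1]
    by_cases hcx : PySem.Chars.isdigit (PySem.List.pyGetD cs x ' ') = true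
    · simp only [hcx]
      simp
      rw [inner_eq s cs x hx0 hcx _ tup
        (fun y hy => by
          have h := (PySem.List.mem_pyRange_one).mp hy
          exact ⟨h.1, h.2⟩)]
      cases exactlyInner s cs x (PySem.List.pyRange (x + 1) (cs.length : Int) 1) tup with
      | inl tup' => exact ih tup' hrest
      | inr r => rfl
    · have hcx' : PySem.Chars.isdigit (PySem.List.pyGetD cs x ' ') = false := by simpa using hcx
      rw [inner_nondigit s cs x hcx']
      simp [hcx']
      exact ih tup hrest

-- ===== VERDICT (by name: the statement is the Claim_ definition above) =====
theorem exactly_spec : Claim_equal_exactly := by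
  intro s _
  unfold Spec_exactly exactly exactly_alt
  exact (outer_eq s s.toList _ []
    (fun x hx => by
      have := (PySem.List.mem_pyRange_one).mp hx
      exact ⟨this.1, this.2⟩)).symm
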